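-- pv_equiv track=rewrite | github.com/ptbarros/dollar-bill-processor | pattern_engine_v2.py | _check_sequential_trinary
-- ===== SOURCE A (Python) =====
-- def _check_sequential_trinary(digits: str) -> bool:
--     """Trinary with sequential digits."""
--     if len(digits) != 8:
--         return False
--     unique = sorted(set(digits))
--     if len(unique) not in [2, 3]:
--         return False
--     nums = [int(d) for d in unique]
--     return all(nums[i] + 1 == nums[i+1] for i in range(len(nums)-1))
-- ===== SOURCE B (Python) =====
-- def _check_sequential_trinary(digits: str) -> bool:
--     """Trinary with sequential digits."""
--     if len(digits) != 8:
--         return False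
--     unique = set(digits)
--     if len(unique) not in (2, 3):
--         return False
--     nums = [int(d) for d in digits]
--     return max(nums) - min(nums) == len(unique) - 1
-- ===== Notes on version B (the rewrite author's own statement) =====
-- stated objective: simpler
-- what changed: Replaces A's sort of the distinct digits plus a scan of adjacent pairs by a no-sort range test: distinct integers are consecutive exactly when max - min equals count - 1 (min/max taken over the whole 8-char string, so no set-iteration order is used).
import Mathlib
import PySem

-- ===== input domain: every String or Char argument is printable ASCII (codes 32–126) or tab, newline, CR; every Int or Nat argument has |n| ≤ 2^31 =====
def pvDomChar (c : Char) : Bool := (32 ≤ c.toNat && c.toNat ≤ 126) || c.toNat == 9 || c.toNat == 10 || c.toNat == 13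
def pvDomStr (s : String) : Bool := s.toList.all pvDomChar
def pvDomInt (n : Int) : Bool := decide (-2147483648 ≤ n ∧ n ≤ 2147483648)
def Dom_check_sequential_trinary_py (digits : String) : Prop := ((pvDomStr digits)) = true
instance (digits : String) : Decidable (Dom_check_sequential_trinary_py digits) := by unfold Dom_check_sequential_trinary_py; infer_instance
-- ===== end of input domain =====

-- B drops A's sort-and-scan of adjacent distinct digits for the no-sort range test
-- max - min == count_distinct - 1 over the whole string; objective: simpler.

-- int(d) for a single character d (helper used by both ports, like Python's int())
def pvCharInt (d : Char) : Int := (PySem.Int.ofChars? [d]).getD 0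

-- the ten decimal-digit characters (used by Pre_ below)
def pvDigs : List Char := ['0', '1', '2', '3', '4', '5', '6', '7', '8', '9']

-- ===== PORT A =====
def check_sequential_trinary_py (digits : String) : Bool :=
  if digits.toList.length ≠ 8 then false
  else
    let unique := PySem.List.sorted (PySem.Set.ofList digits.toList) (fun x => x) false
    if ¬ (unique.length = 2 ∨ unique.length = 3) then false
    else
      let nums := unique.map pvCharInt
      -- indices produced by range(len(nums)-1) are always in range, so pyGetD is exact here
      (PySem.List.pyRange 0 ((nums.length : Int) - 1) 1).all
        (fun i => decide (PySem.List.pyGetD nums i 0 + 1 = PySem.List.pyGetD nums (i + 1) 0))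

-- ===== PORT B =====
def check_sequential_trinary_py_alt (digits : String) : Bool :=
  if digits.toList.length ≠ 8 then false
  else
    let unique := PySem.Set.ofList digits.toList
    if ¬ (unique.length = 2 ∨ unique.length = 3) then false
    else
      let nums := digits.toList.map pvCharInt
      -- nums is nonempty (length 8), so Python's max/min return; .getD 0 is never the default here
      decide ((PySem.List.max? nums (fun x => x)).getD 0 - (PySem.List.min? nums (fun x => x)).getD 0
                = (unique.length : Int) - 1)

-- ===== PRECONDITION & SPEC =====
-- Pre_ excludes exactly the inputs where A raises ValueError: length-8 strings with 2 or 3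
-- distinct characters, some character of which is not a decimal digit (there int(d) raises).
def Pre_check_sequential_trinary_py (digits : String) : Prop :=
  digits.toList.length = 8 →
  ((PySem.Set.ofList digits.toList).length = 2 ∨ (PySem.Set.ofList digits.toList).length = 3) →
  digits.toList.all (fun c => pvDigs.contains c) = true
instance (digits : String) : Decidable (Pre_check_sequential_trinary_py digits) := by
  unfold Pre_check_sequential_trinary_py; infer_instance

def pvWitness_check_sequential_trinary_py : String := "01201201"

def Spec_check_sequential_trinary_py (digits : String) (out : Bool) : Prop := out = check_sequential_trinary_py_alt digits
instance (digits : String) (out : Bool) : Decidable (Spec_check_sequential_trinary_py digits out) := by unfold Spec_check_sequential_trinary_py; infer_instance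

-- ===== CLAIM (what is proved, stated in full; the proofs are below) =====
def Claim_equal_check_sequential_trinary_py : Prop := ∀ (digits : String), Dom_check_sequential_trinary_py digits → Pre_check_sequential_trinary_py digits → Spec_check_sequential_trinary_py digits (check_sequential_trinary_py digits)

-- ===== LEMMAS AND PROOFS =====

-- A's adjacency scan on a list u of distinct chars (as applied to sorted(set(digits)))
def pvAdj (u : List Char) : Bool :=
  (PySem.List.pyRange 0 (((u.map pvCharInt).length : Int) - 1) 1).all
    (fun i => decide (PySem.List.pyGetD (u.map pvCharInt) i 0 + 1
                        = PySem.List.pyGetD (u.map pvCharInt) (i + 1) 0))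

-- B's range test on a list u of distinct chars
def pvRng (u : List Char) : Bool :=
  decide ((PySem.List.max? (u.map pvCharInt) (fun x => x)).getD 0
            - (PySem.List.min? (u.map pvCharInt) (fun x => x)).getD 0 = (u.length : Int) - 1)

lemma max?_id_congr (xs ys : List Int) (hne : xs ≠ [])
    (hmem : ∀ x, x ∈ xs ↔ x ∈ ys) :
    PySem.List.max? xs (fun x => x) = PySem.List.max? ys (fun x => x) := by
  obtain ⟨m, hm⟩ : ∃ m, PySem.List.max? xs (fun x => x) = some m := by
    cases h : PySem.List.max? xs (fun x => x) with
    | none => exact absurd ((PySem.List.max?_eq_none_iff xs _).mp h) hne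
    | some m => exact ⟨m, rfl⟩
  obtain ⟨n, hn⟩ : ∃ n, PySem.List.max? ys (fun x => x) = some n := by
    cases h : PySem.List.max? ys (fun x => x) with
    | none =>
      have : ys = [] := (PySem.List.max?_eq_none_iff ys _).mp h
      cases xs with
      | nil => exact absurd rfl hne
      | cons a t =>
        have ha : a ∈ ys := (hmem a).mp (by simp)
        rw [this] at ha; simp at ha
    | some n => exact ⟨n, rfl⟩
  rw [hm, hn]
  have h1 : m ≤ n := PySem.List.max?_isMax hn m ((hmem m).mp (PySem.List.max?_mem hm))
  have h2 : n ≤ m := PySem.List.max?_isMax hm n ((hmem n).mpr (PySem.List.max?_mem hn))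
  exact congrArg some (le_antisymm h1 h2)

lemma min?_id_congr (xs ys : List Int) (hne : xs ≠ [])
    (hmem : ∀ x, x ∈ xs ↔ x ∈ ys) :
    PySem.List.min? xs (fun x => x) = PySem.List.min? ys (fun x => x) := by
  obtain ⟨m, hm⟩ : ∃ m, PySem.List.min? xs (fun x => x) = some m := by
    cases h : PySem.List.min? xs (fun x => x) with
    | none => exact absurd ((PySem.List.min?_eq_none_iff xs _).mp h) hne
    | some m => exact ⟨m, rfl⟩
  obtain ⟨n, hn⟩ : ∃ n, PySem.List.min? ys (fun x => x) = some n := by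
    cases h : PySem.List.min? ys (fun x => x) with
    | none =>
      have : ys = [] := (PySem.List.min?_eq_none_iff ys _).mp h
      cases xs with
      | nil => exact absurd rfl hne
      | cons a t =>
        have ha : a ∈ ys := (hmem a).mp (by simp)
        rw [this] at ha; simp at ha
    | some n => exact ⟨n, rfl⟩
  rw [hm, hn]
  have h1 : n ≤ m := PySem.List.min?_isMin hn m ((hmem m).mp (PySem.List.min?_mem hm))
  have h2 : m ≤ n := PySem.List.min?_isMin hm n ((hmem n).mpr (PySem.List.min?_mem hn))
  exact congrArg some (le_antisymm h2 h1)

-- the two cores agree on distinct pairs of decimal-digit chars (finite check)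
set_option maxRecDepth 8000 in
set_option maxHeartbeats 2000000 in
lemma pvCore2bool : (pvDigs.all fun a => pvDigs.all fun b =>
    (a == b) || (pvAdj (PySem.List.sorted [a, b] (fun x => x) false) == pvRng [a, b])) = true := by
  decide

-- …and on distinct triples (finite check)
set_option maxRecDepth 8000 in
set_option maxHeartbeats 4000000 in
lemma pvCore3bool : (pvDigs.all fun a => pvDigs.all fun b => pvDigs.all fun c =>
    (a == b) || (a == c) || (b == c) ||
    (pvAdj (PySem.List.sorted [a, b, c] (fun x => x) false) == pvRng [a, b, c])) = true := by
  decide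

lemma pvCore2 : ∀ a ∈ pvDigs, ∀ b ∈ pvDigs, a ≠ b →
    pvAdj (PySem.List.sorted [a, b] (fun x => x) false) = pvRng [a, b] := by
  intro a ha b hb hne
  have h := pvCore2bool
  simp only [List.all_eq_true, Bool.or_eq_true, beq_iff_eq] at h
  rcases h a ha b hb with h' | h'
  · exact absurd h' hne
  · exact h'

lemma pvCore3 : ∀ a ∈ pvDigs, ∀ b ∈ pvDigs, ∀ c ∈ pvDigs, a ≠ b → a ≠ c → b ≠ c →
    pvAdj (PySem.List.sorted [a, b, c] (fun x => x) false) = pvRng [a, b, c] := by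
  intro a ha b hb c hc hab hac hbc
  have h := pvCore3bool
  simp only [List.all_eq_true, Bool.or_eq_true, beq_iff_eq] at h
  rcases h a ha b hb c hc with ((h' | h') | h') | h'
  · exact absurd h' hab
  · exact absurd h' hac
  · exact absurd h' hbc
  · exact h'

lemma pvCore (u : List Char) (hnd : u.Nodup) (hd : ∀ c ∈ u, c ∈ pvDigs)
    (hu : u.length = 2 ∨ u.length = 3) :
    pvAdj (PySem.List.sorted u (fun x => x) false) = pvRng u := by
  rcases hu with h2 | h3
  · obtain ⟨a, b, rfl⟩ := List.length_eq_two.mp h2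
    have hab : a ≠ b := by simp at hnd; exact hnd
    exact pvCore2 a (hd a (by simp)) b (hd b (by simp)) hab
  · obtain ⟨a, b, c, rfl⟩ := List.length_eq_three.mp h3
    simp at hnd
    exact pvCore3 a (hd a (by simp)) b (hd b (by simp)) c (hd c (by simp))
      hnd.1.1 hnd.1.2 hnd.2

lemma pvMain (digits : String) (pre : Pre_check_sequential_trinary_py digits) :
    check_sequential_trinary_py digits = check_sequential_trinary_py_alt digits := by
  unfold check_sequential_trinary_py check_sequential_trinary_py_alt
  by_cases h8 : digits.toList.length = 8
  · rw [if_neg (not_not_intro h8), if_neg (not_not_intro h8)]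
    show (if ¬ ((PySem.List.sorted (PySem.Set.ofList digits.toList) (fun x => x) false).length = 2
            ∨ (PySem.List.sorted (PySem.Set.ofList digits.toList) (fun x => x) false).length = 3)
          then false
          else pvAdj (PySem.List.sorted (PySem.Set.ofList digits.toList) (fun x => x) false))
        = (if ¬ ((PySem.Set.ofList digits.toList).length = 2
              ∨ (PySem.Set.ofList digits.toList).length = 3)
           then false
           else decide ((PySem.List.max? (digits.toList.map pvCharInt) (fun x => x)).getD 0
                  - (PySem.List.min? (digits.toList.map pvCharInt) (fun x => x)).getD 0
                  = ((PySem.Set.ofList digits.toList).length : Int) - 1))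
    have hslen : (PySem.List.sorted (PySem.Set.ofList digits.toList) (fun x => x) false).length
        = (PySem.Set.ofList digits.toList).length :=
      (PySem.List.sorted_perm (PySem.Set.ofList digits.toList) (fun x => x) false).length_eq
    by_cases hu : (PySem.Set.ofList digits.toList).length = 2
        ∨ (PySem.Set.ofList digits.toList).length = 3
    · have hdig : ∀ c ∈ digits.toList, c ∈ pvDigs := by
        have h := pre h8 hu
        simp only [List.all_eq_true, List.contains_iff_mem] at h
        exact h
      have hlne : digits.toList ≠ [] := by intro h; rw [h] at h8; simp at h8
      have hmm : ∀ x, x ∈ digits.toList.map pvCharInt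
          ↔ x ∈ (PySem.Set.ofList digits.toList).map pvCharInt := by
        intro x; simp [List.mem_map, PySem.Set.mem_ofList]
      have hmax := max?_id_congr (digits.toList.map pvCharInt)
        ((PySem.Set.ofList digits.toList).map pvCharInt) (by simpa using hlne) hmm
      have hmin := min?_id_congr (digits.toList.map pvCharInt)
        ((PySem.Set.ofList digits.toList).map pvCharInt) (by simpa using hlne) hmm
      have hcore := pvCore (PySem.Set.ofList digits.toList)
        (PySem.Set.nodup_ofList digits.toList)
        (fun c hc => hdig c ((PySem.Set.mem_ofList digits.toList c).mp hc)) hu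
      rw [if_neg (not_not_intro (by rw [hslen]; exact hu)), if_neg (not_not_intro hu),
        hmax, hmin]
      exact hcore
    · rw [if_pos (by rw [hslen]; exact hu), if_pos hu]
  · rw [if_pos h8, if_pos h8]

-- ===== VERDICT (by name: the statement is the Claim_ definition above) =====
theorem check_sequential_trinary_py_spec : Claim_equal_check_sequential_trinary_py := by
  intro digits _dom pre
  unfold Spec_check_sequential_trinary_py
  exact pvMain digits pre
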